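-- pv_equiv track=rewrite | github.com/jbsam2/algo_problem | kakao/2021/kakao2021_1.py | solution
-- ===== SOURCE A (Python) =====
-- def solution(new_id):
--     tmp=''
--     for i in new_id.lower():
--         if i.isalpha() or i in ['-','_','.'] or i.isdigit():
--             tmp+=i
--     tmp1=''
--     for i in range(len(tmp)):
--         if not tmp1 and tmp[i]=='.':continue
--         if tmp[i]=='.' and tmp1[-1]=='.':continue
--         tmp1+=tmp[i]
--     if tmp1 and tmp1[-1]=='.':tmp1=tmp1[:-1]
--     if not tmp1:tmp1='a'
--     if len(tmp1)>15:
--         tmp1=tmp1[:15]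
--         if tmp1[-1]=='.':tmp1=tmp1[:-1]
--     if len(tmp1)<3:
--         while len(tmp1)<3:tmp1+=tmp1[-1]
--     return tmp1
-- ===== SOURCE B (Python) =====
-- def solution(new_id):
--     out = []
--     for c in new_id.lower():
--         if c.isalnum() or c in '-_':
--             out.append(c)
--         elif c == '.' and out and out[-1] != '.':
--             out.append('.')
--     if out and out[-1] == '.':
--         out.pop()
--     s = ''.join(out[:15]) or 'a'
--     if s[-1] == '.':
--         s = s[:-1]
--     return s + s[-1] * (3 - len(s))
-- ===== Notes on version B (the rewrite author's own statement) =====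
-- stated objective: simpler
-- what changed: B fuses A's two character passes (keep-filter, then dot-collapse with leading-dot skip) into one pass that appends a dot only when it can survive, and replaces A's while-loop padding by the closed-form s + s[-1]*(3-len(s)).
import Mathlib
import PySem

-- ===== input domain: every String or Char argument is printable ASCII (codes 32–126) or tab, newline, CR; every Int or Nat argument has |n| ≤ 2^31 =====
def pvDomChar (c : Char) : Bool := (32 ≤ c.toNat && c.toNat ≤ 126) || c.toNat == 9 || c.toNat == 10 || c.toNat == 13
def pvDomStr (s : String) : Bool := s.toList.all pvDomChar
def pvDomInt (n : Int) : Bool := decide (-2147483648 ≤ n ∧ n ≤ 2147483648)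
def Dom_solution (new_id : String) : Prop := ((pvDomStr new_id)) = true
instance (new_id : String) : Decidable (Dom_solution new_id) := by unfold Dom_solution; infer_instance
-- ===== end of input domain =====

-- B replaces A's three sequential character passes (filter, then dot-collapse, then pad-while-loop)
-- by one fused filtering/collapsing pass and a closed-form pad; objective: simpler (and measurably faster by a constant factor).

-- ===== PORT A =====
-- filter body of A's first loop: keep letters, '-', '_', '.', digits
def pvStepA1 (tmp : List Char) (i : Char) : List Char :=
  if PySem.Chars.isalpha i || ['-', '_', '.'].contains i || PySem.Chars.isdigit i then
    tmp ++ [i]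
  else tmp

-- body of A's second loop (dot collapse); tmp1[-1] is ported as pyGet? tmp1 (-1)
-- (Python evaluates tmp1[-1] only with tmp1 nonempty, where pyGet? is some)
def pvCollapseStep (tmp1 : List Char) (c : Char) : List Char :=
  if tmp1 = [] ∧ c = '.' then tmp1
  else if c = '.' ∧ PySem.List.pyGet? tmp1 (-1) = some '.' then tmp1
  else tmp1 ++ [c]

-- A's `while len(tmp1)<3: tmp1+=tmp1[-1]`; the `none` case of tmp1[-1] is unreachable
-- in A (tmp1 is nonempty there, after the `if not tmp1: tmp1='a'` default)
def pvPadA (l : List Char) : List Char :=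
  if l.length < 3 then
    match PySem.List.pyGet? l (-1) with
    | some c => pvPadA (l ++ [c])
    | none => l
  else l
termination_by 3 - l.length
decreasing_by simp_all; omega

def solution (new_id : String) : String :=
  let tmp : List Char := (PySem.Str.lower new_id).toList.foldl pvStepA1 []
  let tmp1 : List Char := (PySem.List.pyRange 0 (tmp.length : Int) 1).foldl
      (fun tmp1 i => pvCollapseStep tmp1 (PySem.List.pyGetD tmp i ' ')) []
  let tmp1 := if tmp1 ≠ [] ∧ PySem.List.pyGet? tmp1 (-1) = some '.' then
      PySem.List.slice tmp1 none (some (-1)) else tmp1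
  let tmp1 := if tmp1 = [] then ['a'] else tmp1
  let tmp1 := if tmp1.length > 15 then
      let u := PySem.List.slice tmp1 none (some 15)
      if PySem.List.pyGet? u (-1) = some '.' then PySem.List.slice u none (some (-1)) else u
    else tmp1
  let tmp1 := if tmp1.length < 3 then pvPadA tmp1 else tmp1
  String.ofList tmp1

-- ===== PORT B =====
-- body of B's single fused pass; out[-1] is ported as pyGet? out (-1)
def pvStepB (out : List Char) (c : Char) : List Char :=
  if PySem.Chars.isalnum c || ['-', '_'].contains c then out ++ [c]
  else if c = '.' ∧ out ≠ [] ∧ PySem.List.pyGet? out (-1) ≠ some '.' then out ++ [c]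
  else out

-- B's return line `s + s[-1]*(3-len(s))`; s[-1] is pyGet? s (-1) (some _ whenever s ≠ []);
-- the Nat truncation of 3 - len matches Python's empty string for a nonpositive repeat count
def pvFinish (s : List Char) : String :=
  match PySem.List.pyGet? s (-1) with
  | some c => String.ofList (s ++ List.replicate (3 - s.length) c)
  | none => String.ofList s

def solution_alt (new_id : String) : String :=
  let out : List Char := (PySem.Str.lower new_id).toList.foldl pvStepB []
  let out := if out ≠ [] ∧ PySem.List.pyGet? out (-1) = some '.' then out.dropLast else out
  -- ''.join(out[:15]) over one-char strings is the char list out[:15] itself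
  let s := PySem.List.slice out none (some 15)
  let s := if s = [] then ['a'] else s
  let s := if PySem.List.pyGet? s (-1) = some '.' then PySem.List.slice s none (some (-1)) else s
  pvFinish s

-- ===== PRECONDITION & SPEC =====
def Spec_solution (new_id : String) (out : String) : Prop := out = solution_alt new_id
instance (new_id : String) (out : String) : Decidable (Spec_solution new_id out) := by unfold Spec_solution; infer_instance

-- ===== CLAIM (what is proved, stated in full; the proofs are below) =====
def Claim_equal_solution : Prop := ∀ (new_id : String), Dom_solution new_id → Spec_solution new_id (solution new_id)

-- ===== LEMMAS AND PROOFS =====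

-- the predicate of A's first (filter) pass
def pvKeep (c : Char) : Bool :=
  PySem.Chars.isalpha c || ['-', '_', '.'].contains c || PySem.Chars.isdigit c

-- "no two adjacent dots"
def pvNoDD : List Char → Prop := List.IsChain (fun a b => ¬(a = '.' ∧ b = '.'))

-- the tail of A's pipeline (everything after the collapse loop), as a function of the collapsed list
def pvTailA (t : List Char) : String :=
  let t1 := if t ≠ [] ∧ PySem.List.pyGet? t (-1) = some '.' then
      PySem.List.slice t none (some (-1)) else t
  let t1 := if t1 = [] then ['a'] else t1
  let t1 := if t1.length > 15 then
      let u := PySem.List.slice t1 none (some 15)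
      if PySem.List.pyGet? u (-1) = some '.' then PySem.List.slice u none (some (-1)) else u
    else t1
  let t1 := if t1.length < 3 then pvPadA t1 else t1
  String.ofList t1

-- the tail of B's pipeline, as a function of the fused pass's result
def pvTailB (t : List Char) : String :=
  let o := if t ≠ [] ∧ PySem.List.pyGet? t (-1) = some '.' then t.dropLast else t
  let s := PySem.List.slice o none (some 15)
  let s := if s = [] then ['a'] else s
  let s := if PySem.List.pyGet? s (-1) = some '.' then PySem.List.slice s none (some (-1)) else s
  pvFinish s

-- B's fused step = "filter, then collapse", pointwise
lemma pvStepB_eq (acc : List Char) (c : Char) :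
    pvStepB acc c = if pvKeep c then pvCollapseStep acc c else acc := by
  unfold pvStepB pvCollapseStep pvKeep
  simp only [List.contains_eq_mem, List.mem_cons, List.not_mem_nil, or_false, Bool.decide_or]
  by_cases hdot : c = '.'
  · subst hdot
    simp only [show PySem.Chars.isalnum '.' = false from by decide,
      show PySem.Chars.isalpha '.' = false from by decide,
      show PySem.Chars.isdigit '.' = false from by decide,
      show (decide (('.' : Char) = '-')) = false from by decide,
      show (decide (('.' : Char) = '_')) = false from by decide]
    by_cases hne : acc = [] <;>
      by_cases hl : PySem.List.pyGet? acc (-1) = some '.' <;>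
      simp [hne, hl]
  · rw [show PySem.Chars.isalnum c = (PySem.Chars.isalpha c || PySem.Chars.isdigit c) from rfl]
    cases hA : PySem.Chars.isalpha c <;> cases hD : PySem.Chars.isdigit c <;>
      cases h1 : decide (c = '-') <;> cases h2 : decide (c = '_') <;>
      simp [hdot]

lemma pvFusion (L : List Char) (acc : List Char) :
    L.foldl pvStepB acc = (L.filter pvKeep).foldl pvCollapseStep acc := by
  rw [List.foldl_filter]
  induction L generalizing acc with
  | nil => rfl
  | cons c L ih => simp only [List.foldl_cons, pvStepB_eq, ih]

-- the collapse loop never creates two adjacent dots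
lemma pvCollapse_noDD (M : List Char) (acc : List Char) (h : pvNoDD acc) :
    pvNoDD (M.foldl pvCollapseStep acc) := by
  induction M generalizing acc with
  | nil => exact h
  | cons c M ih =>
    apply ih
    unfold pvCollapseStep
    split
    · exact h
    · split
      · exact h
      · rename_i h1 h2
        unfold pvNoDD at h ⊢
        rw [List.isChain_append]
        refine ⟨h, List.isChain_singleton _, ?_⟩
        intro x hx y hy
        simp at hy
        subst hy
        intro ⟨hx', hc⟩
        subst hx'
        apply h2
        refine ⟨hc, ?_⟩
        rw [PySem.List.pyGet?_neg_one]
        simpa using hx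

-- after dropping a trailing dot from a dot-collapsed list, the last char is not a dot
lemma pvNoDD_dropLast (t : List Char) (h : pvNoDD t) (hl : t.getLast? = some '.') :
    t.dropLast.getLast? ≠ some '.' := by
  rw [List.getLast?_eq_head?_reverse, ← List.tail_reverse]
  rw [List.getLast?_eq_head?_reverse] at hl
  have h' : List.IsChain (fun a b => ¬(b = '.' ∧ a = '.')) t.reverse :=
    List.isChain_reverse.mpr h
  cases hr : t.reverse with
  | nil => rw [hr] at hl; simp at hl
  | cons a as =>
    rw [hr] at hl h'
    simp only [List.head?_cons, Option.some_inj] at hl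
    cases as with
    | nil => simp
    | cons b bs =>
      rw [List.isChain_cons_cons] at h'
      simp only [List.tail_cons, List.head?_cons]
      intro hb
      simp only [Option.some_inj] at hb
      exact h'.1 ⟨hb, hl⟩

-- A's while-loop pad equals B's closed-form pad
lemma pvPadA_eq (n : ℕ) : ∀ (l : List Char) (c : Char), l.getLast? = some c →
    n = 3 - l.length → pvPadA l = l ++ List.replicate n c := by
  induction n with
  | zero =>
    intro l c _ hn
    rw [pvPadA]
    have : ¬ l.length < 3 := by omega
    simp [this]
  | succ n ih =>
    intro l c hc hn
    have hlen : l.length < 3 := by omega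
    rw [pvPadA]
    simp only [hlen, if_pos]
    rw [PySem.List.pyGet?_neg_one, hc]
    show pvPadA (l ++ [c]) = l ++ List.replicate (n + 1) c
    have step : pvPadA (l ++ [c]) = (l ++ [c]) ++ List.replicate n c :=
      ih _ c (by simp) (by simp; omega)
    rw [step, List.append_assoc]
    simp [List.replicate_succ]

-- the two pipeline tails agree on any dot-collapsed list
lemma pvTail_eq (t : List Char) (h : pvNoDD t) : pvTailA t = pvTailB t := by
  have hslice15 : ∀ (xs : List Char), PySem.List.slice xs none (some 15) = xs.take 15 := by
    intro xs
    rw [PySem.List.slice_to xs (by norm_num : (0:Int) ≤ (15:Int))]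
    rfl
  have hcond : (t ≠ [] ∧ t.getLast? = some '.') ↔ t.getLast? = some '.' := by
    constructor
    · exact fun ⟨_, h2⟩ => h2
    · intro h2
      exact ⟨fun hnil => by simp [hnil] at h2, h2⟩
  unfold pvTailA pvTailB pvFinish
  simp only [hslice15, PySem.List.slice_to_neg_one, PySem.List.pyGet?_neg_one, hcond]
  set t1 := if t.getLast? = some '.' then t.dropLast else t with ht1
  have hT1 : t1.getLast? ≠ some '.' := by
    by_cases hdot : t.getLast? = some '.'
    · rw [ht1, if_pos hdot]
      exact pvNoDD_dropLast t h hdot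
    · rw [ht1, if_neg hdot]
      exact hdot
  by_cases hnil : t1 = []
  · rw [hnil]
    have hpad : pvPadA ['a'] = ['a', 'a', 'a'] := by
      rw [pvPadA_eq 2 ['a'] 'a' rfl rfl]
      rfl
    simp [hpad]
  · obtain ⟨c, hc⟩ : ∃ c, t1.getLast? = some c := by
      cases hgl : t1.getLast? with
      | none => exact absurd (List.getLast?_eq_none_iff.mp hgl) hnil
      | some c => exact ⟨c, rfl⟩
    by_cases h15 : t1.length ≤ 15
    · have htake : t1.take 15 = t1 := List.take_of_length_le h15
      rw [htake, if_neg hnil, if_neg hT1, hc]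
      by_cases h3 : t1.length < 3
      · rw [if_neg (by omega : ¬ t1.length > 15), if_pos h3,
          pvPadA_eq (3 - t1.length) t1 c hc rfl]
      · rw [if_neg (by omega : ¬ t1.length > 15), if_neg h3,
          (by omega : (3 - t1.length) = 0)]
        simp
    · have hgt : t1.length > 15 := by omega
      have hu : (t1.take 15).length = 15 := List.length_take_of_le (by omega)
      have hune : t1.take 15 ≠ [] := by
        intro he
        rw [he] at hu
        simp at hu
      rw [if_neg hnil, if_pos hgt, if_neg hune]
      set v := if (t1.take 15).getLast? = some '.' then (t1.take 15).dropLast else t1.take 15 with hv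
      have hvlen : 14 ≤ v.length := by
        rw [hv]
        split
        · simp [hu]
        · omega
      have hvne : v ≠ [] := by
        intro he
        rw [he] at hvlen
        simp at hvlen
      obtain ⟨d, hd⟩ : ∃ d, v.getLast? = some d := by
        cases hgl : v.getLast? with
        | none => exact absurd (List.getLast?_eq_none_iff.mp hgl) hvne
        | some d => exact ⟨d, rfl⟩
      rw [if_neg (by omega : ¬ v.length < 3), hd, (by omega : (3 - v.length) = 0)]
      simp

-- ===== VERDICT (by name: the statement is the Claim_ definition above) =====
theorem solution_spec : Claim_equal_solution := by
  intro s _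
  show solution s = solution_alt s
  have hA : solution s = pvTailA
      ((PySem.List.pyRange 0 ((((PySem.Str.lower s).toList).foldl pvStepA1 []).length : Int) 1).foldl
        (fun a i => pvCollapseStep a
          (PySem.List.pyGetD (((PySem.Str.lower s).toList).foldl pvStepA1 []) i ' ')) []) := rfl
  have hB : solution_alt s = pvTailB (((PySem.Str.lower s).toList).foldl pvStepB []) := rfl
  have hA1 : ((PySem.Str.lower s).toList).foldl pvStepA1 [] =
      ((PySem.Str.lower s).toList).filter pvKeep := by
    rw [show pvStepA1 = (fun acc x => if pvKeep x then acc ++ [x] else acc) from rfl,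
      PySem.List.foldl_append_if_eq_filter]
    rfl
  have hfoldA : (PySem.List.pyRange 0 ((((PySem.Str.lower s).toList).foldl pvStepA1 []).length : Int) 1).foldl
        (fun a i => pvCollapseStep a
          (PySem.List.pyGetD (((PySem.Str.lower s).toList).foldl pvStepA1 []) i ' ')) [] =
      (((PySem.Str.lower s).toList).filter pvKeep).foldl pvCollapseStep [] := by
    rw [PySem.List.foldl_pyRange_zero_pyGetD' (((PySem.Str.lower s).toList).foldl pvStepA1 [])
      ' ' pvCollapseStep [], hA1]
  exact hA.trans ((congrArg pvTailA hfoldA).trans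
    (((pvTail_eq _ (pvCollapse_noDD _ [] List.IsChain.nil)).trans
      (congrArg pvTailB (pvFusion ((PySem.Str.lower s).toList) []).symm)).trans hB.symm))
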